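-- pv_equiv track=rewrite | github.com/miliar/Code_Jam_Webscraper | solutions_python/solutions_year16_round2_nr1/1232.py | find
-- ===== SOURCE A (Python) =====
-- def find(s, arr, num, special_char, whole):
-- 	c = 0
-- 	l = list(s)
-- 	for i in s:
-- 		if i == special_char:
-- 			c += 1
--
-- 	for i in range(c):
-- 		arr.append(num)
-- 		for w in whole:
-- 			del l[l.index(w)]
-- 	return "".join(l)
-- ===== SOURCE B (Python) =====
-- def find(s, arr, num, special_char, whole):
--     c = s.count(special_char) if len(special_char) == 1 else 0
--     arr += [num] * c
--     if c == 0 or not whole: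
--         return s
--     need = {}
--     for ch in whole:
--         need[ch] = need.get(ch, 0) + c
--     out = []
--     for ch in s:
--         if need.get(ch, 0) > 0:
--             need[ch] -= 1
--         else:
--             out.append(ch)
--     return "".join(out)
-- ===== Notes on version B (the rewrite author's own statement) =====
-- stated objective: faster
-- what changed: Instead of c rounds each deleting the first occurrence of every char of whole via list.index/del, B counts special_char once, computes per-char removal quotas in a dict, and does one left-to-right pass over s skipping quota'd occurrences.
import Mathlib
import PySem

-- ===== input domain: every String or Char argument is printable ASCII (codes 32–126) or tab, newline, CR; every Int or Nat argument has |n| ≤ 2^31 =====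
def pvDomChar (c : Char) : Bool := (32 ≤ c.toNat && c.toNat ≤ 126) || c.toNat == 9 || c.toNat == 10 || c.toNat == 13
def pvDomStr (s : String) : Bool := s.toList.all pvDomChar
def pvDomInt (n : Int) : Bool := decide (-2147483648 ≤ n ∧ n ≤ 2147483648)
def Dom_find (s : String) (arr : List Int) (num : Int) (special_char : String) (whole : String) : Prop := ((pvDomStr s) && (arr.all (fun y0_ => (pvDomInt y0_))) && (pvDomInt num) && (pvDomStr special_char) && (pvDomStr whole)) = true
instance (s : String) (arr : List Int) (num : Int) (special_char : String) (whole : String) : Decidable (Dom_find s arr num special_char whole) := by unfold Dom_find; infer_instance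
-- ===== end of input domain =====

-- B replaces A's c rounds of per-char list.index/del with one str.count, a dict of per-char
-- removal quotas and one left-to-right skip pass (objective: faster). Python A and B both
-- append num to arr c times (a mutation with no effect on the return value); the
-- equivalence proved here is about the RETURN value only.

-- ===== PORT A =====
def find (s : String) (arr : List Int) (num : Int) (special_char : String) (whole : String) : String :=
  -- c = count of chars of s equal to special_char; then c rounds, each deleting the first
  -- occurrence (l.index) of every char of whole; arr.append(num) is a mutation, not ported.
  String.ofList
    ((PySem.List.pyRange 0
        (s.toList.foldl (fun c i => if String.ofList [i] = special_char then c + 1 else c) 0) 1).foldl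
      (fun l _ => whole.toList.foldl (fun l w =>
        match PySem.List.index? l w with   -- l.index(w); none = ValueError (excluded by Pre_)
        | some i => l.eraseIdx i           -- del l[...]
        | none => l) l) s.toList)

-- ===== PORT B =====
def find_alt (s : String) (arr : List Int) (num : Int) (special_char : String) (whole : String) : String :=
  if (if PySem.Str.len special_char = 1 then PySem.Str.count s special_char else 0) = 0
      ∨ whole.toList = [] then s
  else
    String.ofList
      ((s.toList.foldl (fun (p : PySem.Dict Char Int × List Char) ch =>
          if p.1.getD ch 0 > 0 then (p.1.insert ch (p.1.getD ch 0 - 1), p.2)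
          else (p.1, p.2 ++ [ch]))
        (whole.toList.foldl (fun d ch => d.insert ch (d.getD ch 0 +
            ((if PySem.Str.len special_char = 1 then PySem.Str.count s special_char else 0 : Nat) : Int)))
          PySem.Dict.empty, [])).2)

-- ===== PRECONDITION & SPEC =====
-- Pre_ excludes exactly the inputs where Python A raises ValueError: some character of whole
-- occurs in s fewer times than the c rounds delete it (c = chars of s equal to special_char).
def Pre_find (s : String) (arr : List Int) (num : Int) (special_char : String) (whole : String) : Prop :=
  (whole.toList.all (fun ch =>
    (s.toList.countP (fun c2 => String.ofList [c2] = special_char)) * whole.toList.count ch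
      ≤ s.toList.count ch)) = true
instance (s : String) (arr : List Int) (num : Int) (special_char : String) (whole : String) : Decidable (Pre_find s arr num special_char whole) := by unfold Pre_find; infer_instance

def pvWitness_find : String × List Int × Int × String × String := ("ab!", [3], 5, "!", "a")

def Spec_find (s : String) (arr : List Int) (num : Int) (special_char : String) (whole : String) (out : String) : Prop := out = find_alt s arr num special_char whole
instance (s : String) (arr : List Int) (num : Int) (special_char : String) (whole : String) (out : String) : Decidable (Spec_find s arr num special_char whole out) := by unfold Spec_find; infer_instance

-- ===== CLAIM (what is proved, stated in full; the proofs are below) =====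
def Claim_equal_find : Prop := ∀ (s : String) (arr : List Int) (num : Int) (special_char : String) (whole : String), Dom_find s arr num special_char whole → Pre_find s arr num special_char whole → Spec_find s arr num special_char whole (find s arr num special_char whole)


-- ===== LEMMAS AND PROOFS =====

/-- Keep the chars of `l` left to right, skipping the first `n ch` occurrences of each `ch`. -/
def skipChars : List Char → (Char → Nat) → List Char
  | [], _ => []
  | a :: t, n =>
    if n a > 0 then skipChars t (fun x => if x = a then n a - 1 else n x)
    else a :: skipChars t n

theorem skip_zero (l : List Char) : skipChars l (fun _ => 0) = l := by
  induction l with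
  | nil => rfl
  | cons a t ih => simp [skipChars, ih]

theorem step_eq_erase (l : List Char) (w : Char) :
    (match PySem.List.index? l w with
     | some i => l.eraseIdx i
     | none => l) = l.erase w := by
  cases h : PySem.List.index? l w with
  | none =>
    simp only [h]
    exact (List.erase_of_not_mem ((PySem.List.index?_eq_none_iff l w).mp h)).symm
  | some i =>
    simp only [h]
    obtain ⟨pre, suf, rfl, hlen, hnot⟩ := (PySem.List.index?_eq_some_iff l w i).mp h
    rw [← hlen, List.eraseIdx_append_of_length_le (le_refl pre.length),
      List.erase_append_right _ hnot]
    simp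

theorem skip_erase (l : List Char) (w : Char) (n : Char → Nat) :
    skipChars (l.erase w) n = skipChars l (fun x => if x = w then n x + 1 else n x) := by
  induction l generalizing n with
  | nil => simp [skipChars]
  | cons a t ih =>
    by_cases h : a = w
    · subst h
      rw [List.erase_cons_head]
      conv_rhs => rw [skipChars]
      rw [if_pos (by simp : 0 < if a = a then n a + 1 else n a)]
      congr 1
      funext x
      by_cases hx : x = a <;> simp [hx]
    · rw [List.erase_cons_tail (by simp [h])]
      simp only [skipChars]
      by_cases ha : n a > 0
      · rw [if_pos ha, if_pos (by simp [h]; omega), ih]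
        have h' : ¬ w = a := fun e => h e.symm
        congr 1
        funext x
        by_cases hx : x = a
        · subst hx; simp [h]
        · by_cases hw : x = w <;> simp [hx, hw, h']
      · rw [if_neg ha, if_neg (by simpa [h] using ha), ih]

theorem foldl_erase_eq_skip (ws l : List Char) :
    ws.foldl (fun l w => l.erase w) l = skipChars l (fun ch => ws.count ch) := by
  induction ws generalizing l with
  | nil =>
    simp only [List.foldl_nil, List.count_nil]
    exact (skip_zero l).symm
  | cons w ws ih =>
    rw [List.foldl_cons, ih, skip_erase]
    congr 1
    funext x
    by_cases hx : x = w
    · simp [hx]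
    · simp [hx, Ne.symm hx]

theorem skip_skip (l : List Char) (n m : Char → Nat) :
    skipChars (skipChars l n) m = skipChars l (fun ch => n ch + m ch) := by
  induction l generalizing n m with
  | nil => simp [skipChars]
  | cons a t ih =>
    simp only [skipChars]
    by_cases ha : n a > 0
    · rw [if_pos ha, if_pos (show n a + m a > 0 by omega), ih]
      congr 1
      funext x
      by_cases hx : x = a
      · subst hx; rw [if_pos rfl, if_pos rfl]; omega
      · rw [if_neg hx, if_neg hx]
    · rw [if_neg ha]
      simp only [skipChars]
      by_cases hm : m a > 0
      · rw [if_pos hm, if_pos (show n a + m a > 0 by omega), ih]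
        congr 1
        funext x
        by_cases hx : x = a
        · subst hx; rw [if_pos rfl, if_pos rfl]; omega
        · rw [if_neg hx, if_neg hx]
      · rw [if_neg hm, if_neg (show ¬ n a + m a > 0 by omega), ih]

theorem foldl_ignore_eq_iterate {α β : Type} (g : α → α) (xs : List β) (init : α) :
    xs.foldl (fun l _ => g l) init = g^[xs.length] init := by
  induction xs generalizing init with
  | nil => simp
  | cons x xs ih => simp [ih, Function.iterate_succ_apply]

theorem iterate_round (W : List Char) (k : Nat) (l : List Char) :
    (fun l => skipChars l (fun ch => W.count ch))^[k] l
      = skipChars l (fun ch => k * W.count ch) := by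
  induction k generalizing l with
  | zero =>
    simp only [Function.iterate_zero, id_eq, Nat.zero_mul]
    exact (skip_zero l).symm
  | succ k ih =>
    rw [Function.iterate_succ_apply', ih, skip_skip]
    congr 1
    funext ch
    ring

theorem getD_build (W : List Char) (c : Int) (d : PySem.Dict Char Int) (x : Char) :
    (W.foldl (fun d ch => d.insert ch (d.getD ch 0 + c)) d).getD x 0
      = d.getD x 0 + (W.count x : Int) * c := by
  induction W generalizing d with
  | nil => simp
  | cons a W ih =>
    rw [List.foldl_cons, ih, PySem.Dict.getD_insert]
    by_cases hx : x = a
    · subst hx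
      simp [List.count_cons]
      ring
    · rw [if_neg hx]
      have hcnt : List.count x (a :: W) = List.count x W := by
        simp [Ne.symm hx]
      rw [hcnt]

theorem pass_eq_skip (l : List Char) (d : PySem.Dict Char Int) (acc : List Char)
    (hnn : ∀ ch, 0 ≤ d.getD ch 0) :
    (l.foldl (fun (p : PySem.Dict Char Int × List Char) ch =>
      if p.1.getD ch 0 > 0 then (p.1.insert ch (p.1.getD ch 0 - 1), p.2)
      else (p.1, p.2 ++ [ch])) (d, acc)).2
      = acc ++ skipChars l (fun ch => (d.getD ch 0).toNat) := by
  induction l generalizing d acc with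
  | nil => simp [skipChars]
  | cons a t ih =>
    rw [List.foldl_cons]
    by_cases ha : d.getD a 0 > 0
    · rw [if_pos ha]
      rw [ih (d.insert a (d.getD a 0 - 1)) acc (by
        intro ch
        rw [PySem.Dict.getD_insert]
        by_cases hc : ch = a
        · rw [if_pos hc]; omega
        · rw [if_neg hc]; exact hnn ch)]
      rw [skipChars, if_pos (by omega)]
      congr 2
      funext x
      rw [PySem.Dict.getD_insert]
      by_cases hx : x = a
      · rw [if_pos hx, if_pos hx]; omega
      · rw [if_neg hx, if_neg hx]
    · rw [if_neg ha, ih d (acc ++ [a]) hnn, skipChars,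
        if_neg (by have := hnn a; omega)]
      simp

theorem count_fold (s : List Char) (special_char : String) :
    s.foldl (fun c i => if String.ofList [i] = special_char then c + 1 else c) (0 : Int)
      = (s.countP (fun c2 => String.ofList [c2] = special_char) : Int) := by
  simpa using PySem.List.foldl_ite_add_one (fun i => String.ofList [i] = special_char) s 0

theorem go_single (c : Char) (l : List Char) (fuel acc : Nat) (h : l.length ≤ fuel) :
    PySem.Chars.count.go [c] fuel l acc = acc + l.count c := by
  induction l generalizing fuel acc with
  | nil => cases fuel <;> simp [PySem.Chars.count.go]
  | cons a t ih =>
    cases fuel with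
    | zero => simp at h
    | succ f =>
      rw [PySem.Chars.count.go]
      simp only [List.isPrefixOf, Bool.and_true, List.length_cons, List.drop_succ_cons]
      by_cases hc : c = a
      · rw [if_pos (by simp [hc])]
        simp only [List.length_nil, List.drop_zero]
        rw [ih f (acc + 1) (by simpa using h)]
        simp [hc, List.count_cons]
        omega
      · rw [if_neg (by simp [hc]), ih f acc (by simpa using h)]
        simp [List.count_cons, Ne.symm hc]

theorem count_single (s special_char : String) (c : Char)
    (h : special_char.toList = [c]) :
    PySem.Str.count s special_char = s.toList.count c := by
  rw [PySem.Str.count, PySem.Chars.count, h]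
  simp only [List.isEmpty_cons, Bool.false_eq_true, if_false]
  rw [go_single c s.toList s.toList.length 0 (le_refl _)]
  simp

theorem countP_single (s special_char : String) (c : Char)
    (h : special_char.toList = [c]) :
    s.toList.countP (fun c2 => String.ofList [c2] = special_char) = s.toList.count c := by
  have hiff : ∀ c2 : Char, String.ofList [c2] = special_char ↔ c2 = c := by
    intro c2
    constructor
    · intro e
      have := congrArg String.toList e
      simpa [h] using this
    · rintro rfl
      rw [← h, String.ofList_toList]
  have : (fun c2 => decide (String.ofList [c2] = special_char)) = (fun c2 => c2 == c) := by
    funext c2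
    simp [hiff c2, beq_eq_decide]
  rw [List.countP, this]
  rfl

-- B's `s.count(special_char) if len(special_char) == 1 else 0` equals A's char-comparison count.
theorem cB_eq (s special_char : String) :
    (if PySem.Str.len special_char = 1 then PySem.Str.count s special_char else 0)
      = s.toList.countP (fun c2 => String.ofList [c2] = special_char) := by
  by_cases hlen : PySem.Str.len special_char = 1
  · rw [if_pos hlen]
    rw [PySem.Str.len_eq] at hlen
    have h1 : special_char.toList.length = 1 := by exact_mod_cast hlen
    obtain ⟨c, hc⟩ := List.length_eq_one_iff.mp h1
    rw [count_single s special_char c hc, countP_single s special_char c hc]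
  · rw [if_neg hlen]
    rw [PySem.Str.len_eq] at hlen
    symm
    rw [List.countP_eq_zero]
    intro a _ ha
    rw [decide_eq_true_eq] at ha
    have := congrArg String.toList ha
    rw [String.toList_ofList] at this
    apply hlen
    rw [← this]
    rfl

-- Both ports delete, for each char ch, the first c·count(ch, whole) occurrences of ch, so
-- they agree on all inputs (Pre_ matters only because the Python A raises outside it).
theorem ports_agree (s : String) (arr : List Int) (num : Int) (special_char : String) (whole : String) :
    find s arr num special_char whole = find_alt s arr num special_char whole := by
  unfold find find_alt
  have hinner : ∀ (l : List Char),
      whole.toList.foldl (fun l w =>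
        match PySem.List.index? l w with
        | some i => l.eraseIdx i
        | none => l) l = skipChars l (fun ch => List.count ch whole.toList) := by
    intro l
    rw [PySem.List.foldl_congr_mem whole.toList _ (fun l w => l.erase w) l
      (fun acc x _ => step_eq_erase acc x)]
    exact foldl_erase_eq_skip whole.toList l
  have hk := count_fold s.toList special_char
  have hA : (PySem.List.pyRange 0
        (s.toList.foldl (fun c i => if String.ofList [i] = special_char then c + 1 else c) 0) 1).foldl
      (fun l _ => whole.toList.foldl (fun l w =>
        match PySem.List.index? l w with
        | some i => l.eraseIdx i
        | none => l) l) s.toList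
      = skipChars s.toList
          (fun ch => s.toList.countP (fun c2 => String.ofList [c2] = special_char)
            * List.count ch whole.toList) := by
    rw [PySem.List.foldl_congr_mem _ _ (fun l _ => skipChars l (fun ch => List.count ch whole.toList))
      s.toList (fun acc x _ => hinner acc)]
    rw [foldl_ignore_eq_iterate, PySem.List.length_pyRange_one, hk, iterate_round]
    simp
  rw [hA, cB_eq]
  by_cases hz : s.toList.countP (fun c2 => String.ofList [c2] = special_char) = 0
      ∨ whole.toList = []
  · rw [if_pos hz]
    have hquota : (fun ch => s.toList.countP (fun c2 => String.ofList [c2] = special_char)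
        * List.count ch whole.toList) = fun _ => 0 := by
      funext ch
      rcases hz with hz | hz
      · rw [hz, Nat.zero_mul]
      · rw [hz, List.count_nil, Nat.mul_zero]
    rw [hquota, skip_zero, String.ofList_toList]
  · rw [if_neg hz]
    have hnn : ∀ ch, 0 ≤ (whole.toList.foldl (fun d ch => d.insert ch (d.getD ch 0 +
        ((s.toList.countP (fun c2 => String.ofList [c2] = special_char) : Nat) : Int)))
        PySem.Dict.empty).getD ch 0 := by
      intro ch
      rw [getD_build]
      simp only [PySem.Dict.getD_empty, zero_add]
      positivity
    rw [pass_eq_skip _ _ _ hnn]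
    rw [List.nil_append]
    congr 1
    congr 1
    funext ch
    rw [getD_build]
    simp only [PySem.Dict.getD_empty, zero_add]
    rw [← Nat.cast_mul, Int.toNat_natCast, Nat.mul_comm]

-- ===== VERDICT (by name: the statement is the Claim_ definition above) =====
theorem find_spec : Claim_equal_find := by
  intro s arr num special_char whole _ _
  unfold Spec_find
  exact ports_agree s arr num special_char whole
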